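-- pv_equiv track=rewrite | github.com/NTCHz/Nont-CMU_CS204111 | LAB13/HW13_3/HW13_3.py | sum_d_product
-- ===== SOURCE A (Python) =====
-- def sum_d_product(m):
--     n = len(m)
--     result = []
--     cur = []
--
--     if n == 2:
--         return (m[0][0] * m[1][1] + m[0][1] * m[1][0])
--
--     for i in range (0, n, 2):
--         for j in range(0, n, 2):
--             list_a = [[m[i][j],m[i][j+1]],[m[i+1][j],m[i+1][j+1]]]
--             cur.append(list_a[0][0] * list_a[1][1] + list_a[0][1] * list_a[1][0])
--         result.append(cur)
--         cur = []
--
--     return sum_d_product(result)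
-- ===== SOURCE B (Python) =====
-- def sum_d_product(m):
--     # Iterative reduction: repeatedly collapse 2x2 blocks until a 2x2 matrix remains.
--     while len(m) != 2:
--         n = len(m)
--         m = [[m[i][j] * m[i + 1][j + 1] + m[i][j + 1] * m[i + 1][j]
--               for j in range(0, n, 2)]
--              for i in range(0, n, 2)]
--     return m[0][0] * m[1][1] + m[0][1] * m[1][0]
-- ===== Notes on version B (the rewrite author's own statement) =====
-- stated objective: alternative
-- what changed: Replaced the recursive call with an iterative while-loop that rebuilds the matrix via nested comprehensions (map-of-maps) instead of append-accumulated rows and a recursive descent.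
import Mathlib
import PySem

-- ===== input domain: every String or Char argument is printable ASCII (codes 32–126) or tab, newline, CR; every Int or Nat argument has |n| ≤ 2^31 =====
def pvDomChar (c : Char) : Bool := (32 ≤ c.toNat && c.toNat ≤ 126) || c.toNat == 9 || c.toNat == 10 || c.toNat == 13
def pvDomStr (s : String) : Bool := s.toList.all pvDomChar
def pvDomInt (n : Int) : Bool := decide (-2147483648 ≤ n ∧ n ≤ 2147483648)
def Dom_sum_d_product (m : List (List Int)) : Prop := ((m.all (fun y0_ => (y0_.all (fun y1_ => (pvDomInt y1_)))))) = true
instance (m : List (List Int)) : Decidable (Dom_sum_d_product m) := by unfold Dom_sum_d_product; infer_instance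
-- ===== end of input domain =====

-- B replaces A's recursion by an iterative while-loop reduction (map-of-maps step instead of
-- append-accumulated rows); same cost, different decomposition (objective: alternative).

-- m[i][j] as both Pythons write it; exact whenever both indices are in range (guaranteed by Pre_)
def pyAt (m : List (List Int)) (i j : Int) : Int :=
  PySem.List.pyGetD (PySem.List.pyGetD m i []) j 0

-- (pyRange 0 n 2).length = (n+1)/2 — cited by both ports' termination proofs
theorem length_pyRange_two (n : Nat) :
    (PySem.List.pyRange 0 (n : Int) 2).length = (n + 1) / 2 := by
  rw [PySem.List.pyRange_of_pos 0 (n : Int) (by norm_num)]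
  simp only [List.length_map, List.length_range]
  split_ifs with h
  · omega
  · omega

-- ===== PORT A =====
def sum_d_product (m : List (List Int)) : Int :=
  let n : Int := PySem.List.len m
  if n = 2 then
    pyAt m 0 0 * pyAt m 1 1 + pyAt m 0 1 * pyAt m 1 0
  else if m.length < 2 then 0
    -- totalization guard only: here Python A raises IndexError (n = 1) or exceeds the
    -- recursion depth (n = 0); these inputs are outside Pre_
  else
    sum_d_product ((PySem.List.pyRange 0 n 2).foldl (fun result i =>
      result ++ [(PySem.List.pyRange 0 n 2).foldl (fun cur j =>
        let list_a := [[pyAt m i j, pyAt m i (j+1)], [pyAt m (i+1) j, pyAt m (i+1) (j+1)]]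
        cur ++ [pyAt list_a 0 0 * pyAt list_a 1 1 + pyAt list_a 0 1 * pyAt list_a 1 0]) []]) [])
termination_by m.length
decreasing_by
  simp only [PySem.List.foldl_append_singleton_eq_map, List.nil_append, List.length_map,
    PySem.List.len_eq, length_pyRange_two]
  omega

-- ===== PORT B =====
-- one pass of B's while-loop body: the nested comprehension
def bStep (m : List (List Int)) : List (List Int) :=
  let n : Int := PySem.List.len m
  (PySem.List.pyRange 0 n 2).map (fun i =>
    (PySem.List.pyRange 0 n 2).map (fun j =>
      pyAt m i j * pyAt m (i+1) (j+1) + pyAt m i (j+1) * pyAt m (i+1) j))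

-- B's 'while len(m) != 2' loop, computing the final matrix.
-- Totalization: for length < 2 Python B loops forever (n = 0) or raises (n = 1) — outside Pre_ —
-- so the loop simply stops there.
def bLoop (m : List (List Int)) : List (List Int) :=
  if m.length ≤ 2 then m
  else bLoop (bStep m)
termination_by m.length
decreasing_by
  simp only [bStep, List.length_map, PySem.List.len_eq, length_pyRange_two]
  omega

def sum_d_product_alt (m : List (List Int)) : Int :=
  let r := bLoop m
  pyAt r 0 0 * pyAt r 1 1 + pyAt r 0 1 * pyAt r 1 0

-- ===== PRECONDITION & SPEC =====
-- Exactly the inputs on which Python A returns: len(m) is a power of two ≥ 2 and every row has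
-- at least len(m) entries (otherwise the 2x2 indexing raises IndexError, or n = 0 exceeds the
-- recursion depth).
def Pre_sum_d_product (m : List (List Int)) : Prop :=
  m.length = 2 ^ (Nat.log2 m.length) ∧ 2 ≤ m.length ∧ ∀ r ∈ m, m.length ≤ r.length
instance (m : List (List Int)) : Decidable (Pre_sum_d_product m) := by
  unfold Pre_sum_d_product; infer_instance

def pvWitness_sum_d_product : List (List Int) := [[1, 2], [3, 4]]

def Spec_sum_d_product (m : List (List Int)) (out : Int) : Prop := out = sum_d_product_alt m
instance (m : List (List Int)) (out : Int) : Decidable (Spec_sum_d_product m out) := by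
  unfold Spec_sum_d_product; infer_instance

-- ===== CLAIM (what is proved, stated in full; the proofs are below) =====
def Claim_equal_sum_d_product : Prop :=
  ∀ (m : List (List Int)), Dom_sum_d_product m → Pre_sum_d_product m →
    Spec_sum_d_product m (sum_d_product m)

-- ===== LEMMAS AND PROOFS =====

-- A's 2x2 helper list, indexed back, is the direct block formula
theorem block_eq (a b c d : Int) :
    pyAt [[a, b], [c, d]] 0 0 * pyAt [[a, b], [c, d]] 1 1 +
      pyAt [[a, b], [c, d]] 0 1 * pyAt [[a, b], [c, d]] 1 0 = a * d + b * c := by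
  simp [pyAt, PySem.List.pyGetD, PySem.List.pyGet?, PySem.List.pyIdx?]

-- A's append-accumulated step matrix is B's comprehension step matrix
theorem stepA_eq_bStep (m : List (List Int)) :
    ((PySem.List.pyRange 0 (PySem.List.len m) 2).foldl (fun result i =>
      result ++ [(PySem.List.pyRange 0 (PySem.List.len m) 2).foldl (fun cur j =>
        let list_a := [[pyAt m i j, pyAt m i (j+1)], [pyAt m (i+1) j, pyAt m (i+1) (j+1)]]
        cur ++ [pyAt list_a 0 0 * pyAt list_a 1 1 + pyAt list_a 0 1 * pyAt list_a 1 0]) []]) [])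
    = bStep m := by
  simp only [PySem.List.foldl_append_singleton_eq_map, List.nil_append, bStep, block_eq]

-- the shared base formula is 0 on matrices with fewer than 2 rows (both totalization guards)
theorem base_zero (m : List (List Int)) (h : m.length < 2) :
    pyAt m 0 0 * pyAt m 1 1 + pyAt m 0 1 * pyAt m 1 0 = 0 := by
  match m, h with
  | [], _ => simp [pyAt, PySem.List.pyGetD, PySem.List.pyGet?, PySem.List.pyIdx?]
  | [r], _ => simp [pyAt, PySem.List.pyGetD, PySem.List.pyGet?, PySem.List.pyIdx?]

theorem alt_step (m : List (List Int)) (h : ¬ m.length ≤ 2) :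
    sum_d_product_alt m = sum_d_product_alt (bStep m) := by
  unfold sum_d_product_alt
  rw [bLoop, if_neg h]

theorem a_eq_alt (m : List (List Int)) : sum_d_product m = sum_d_product_alt m := by
  generalize hk : m.length = k
  induction k using Nat.strong_induction_on generalizing m with
  | _ k ih =>
    rw [sum_d_product]
    simp only [PySem.List.len_eq]
    by_cases h2 : (m.length : Int) = 2
    · rw [if_pos h2]
      unfold sum_d_product_alt
      rw [bLoop, if_pos (by omega)]
    · rw [if_neg h2]
      by_cases hlt : m.length < 2
      · rw [if_pos hlt]
        unfold sum_d_product_alt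
        rw [bLoop, if_pos (by omega)]
        exact (base_zero m hlt).symm
      · rw [if_neg hlt]
        have hs : ((PySem.List.pyRange 0 ((m.length : Int)) 2).foldl (fun result i =>
            result ++ [(PySem.List.pyRange 0 ((m.length : Int)) 2).foldl (fun cur j =>
              let list_a := [[pyAt m i j, pyAt m i (j+1)], [pyAt m (i+1) j, pyAt m (i+1) (j+1)]]
              cur ++ [pyAt list_a 0 0 * pyAt list_a 1 1 + pyAt list_a 0 1 * pyAt list_a 1 0]) []]) [])
            = bStep m := by
          have := stepA_eq_bStep m
          simpa [PySem.List.len_eq] using this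
        rw [hs]
        have hlen : (bStep m).length < m.length := by
          simp only [bStep, List.length_map, PySem.List.len_eq, length_pyRange_two]
          omega
        rw [ih (bStep m).length (by omega) (bStep m) rfl]
        exact (alt_step m (by omega)).symm

-- ===== VERDICT (by name: the statement is the Claim_ definition above) =====
theorem sum_d_product_spec : Claim_equal_sum_d_product := by
  intro m _ _
  exact a_eq_alt m
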